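-- pv_equiv track=rewrite | github.com/miliar/Code_Jam_Webscraper | solutions_python/Problem_138/1019.py | warScore
-- ===== SOURCE A (Python) =====
-- def warScore (n, k):
-- 	score = 0
-- 	for block in n:
-- 		if block > max(k):
-- 			score += 1
-- 			del k[k.index(min(k))]
-- 		else:
-- 			del k[k.index(minAbove(k, block))]
-- 	return score
--
-- def minAbove(l, above):
-- 	mn = None
-- 	for num in l:
-- 		if num > above and (mn == None or num < mn):
-- 			mn = num
-- 	return mn
-- ===== SOURCE B (Python) =====
-- def warScore(n, k):
--     # Works on a sorted copy of k; binary search finds the smallest card above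
--     # each block (no per-step max/min/index scans).  Does not mutate k (A does).
--     ks = sorted(k)
--     score = 0
--     for block in n:
--         lo, hi = 0, len(ks)
--         while lo < hi:
--             mid = (lo + hi) // 2
--             if ks[mid] > block:
--                 hi = mid
--             else:
--                 lo = mid + 1
--         if lo == len(ks):
--             score += 1
--             ks.pop(0)
--         else:
--             ks.pop(lo)
--     return score
-- ===== Notes on version B (the rewrite author's own statement) =====
-- stated objective: faster
-- what changed: B sorts k once and serves every block with a hand-written binary search on the sorted remainder (first card above the block; win = search runs off the end), replacing A's per-block max/min/minAbove/index linear scans; B works on a sorted copy and does not mutate k (A deletes from k in place).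
-- outside the precondition, e.g. on warScore([0, 1], [1, 9]): A returns 0, B returns 0
import Mathlib
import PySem

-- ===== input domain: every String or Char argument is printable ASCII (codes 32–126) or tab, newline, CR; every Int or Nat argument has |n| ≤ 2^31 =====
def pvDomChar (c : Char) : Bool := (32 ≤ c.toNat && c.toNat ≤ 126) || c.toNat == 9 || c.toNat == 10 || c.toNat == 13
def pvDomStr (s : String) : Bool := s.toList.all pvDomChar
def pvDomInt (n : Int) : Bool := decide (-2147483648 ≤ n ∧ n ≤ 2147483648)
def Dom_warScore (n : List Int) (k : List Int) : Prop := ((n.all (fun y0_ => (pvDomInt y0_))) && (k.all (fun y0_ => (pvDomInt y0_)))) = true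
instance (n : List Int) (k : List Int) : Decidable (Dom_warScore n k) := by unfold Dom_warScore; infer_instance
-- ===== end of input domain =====

-- B sorts k once and binary-searches the sorted remainder instead of A's per-block
-- max/min/minAbove/index scans (measured faster); equivalence is about the RETURN value:
-- A deletes from k in place, B works on a sorted copy and leaves k untouched.

-- ===== PORT A =====
def minAbovePort (l : List Int) (above : Int) : Option Int :=
  l.foldl (fun mn num =>
    match mn with
    | none => if above < num then some num else none
    | some m => if above < num ∧ num < m then some num else some m) none

def warScoreStepA (st : Int × List Int) (block : Int) : Int × List Int :=
  match PySem.List.max? st.2 (fun x => x) with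
  | none => st            -- Python: max([]) raises ValueError (excluded by Pre_)
  | some mx =>
    if mx < block then
      match PySem.List.min? st.2 (fun x => x) with
      | none => st        -- unreachable given max? succeeded
      | some mn =>
        match PySem.List.index? st.2 mn with
        | none => st
        | some i => (st.1 + 1, st.2.eraseIdx i)
    else
      match minAbovePort st.2 block with
      | none => st        -- Python: k.index(None) raises ValueError (excluded by Pre_)
      | some m =>
        match PySem.List.index? st.2 m with
        | none => st
        | some i => (st.1, st.2.eraseIdx i)

def warScore (n : List Int) (k : List Int) : Int :=
  (n.foldl warScoreStepA (0, k)).1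

-- ===== PORT B =====
-- the hand-written while-loop binary search of Source B: first index in lo..hi with ks[idx] > block
-- (the while loop is transliterated with a fuel counter; hi - lo steps always suffice)
def bsrFuel (ks : List Int) (block : Int) : Nat → Nat → Nat → Nat
  | 0, lo, _ => lo
  | f + 1, lo, hi =>
    if lo < hi then
      if block < ks.getD ((lo + hi) / 2) 0 then bsrFuel ks block f lo ((lo + hi) / 2)
      else bsrFuel ks block f ((lo + hi) / 2 + 1) hi
    else lo

def bsr (ks : List Int) (block : Int) (lo hi : Nat) : Nat :=
  bsrFuel ks block (hi - lo) lo hi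

def warScoreStepB (st : Int × List Int) (block : Int) : Int × List Int :=
  let lo := bsr st.2 block 0 st.2.length
  if lo = st.2.length then (st.1 + 1, st.2.eraseIdx 0)   -- ks.pop(0); raises IndexError on [] (excluded by Pre_)
  else (st.1, st.2.eraseIdx lo)                          -- ks.pop(lo)

def warScore_alt (n : List Int) (k : List Int) : Int :=
  (n.foldl warScoreStepB (0, PySem.List.sorted k (fun x => x) false)).1

-- ===== PRECONDITION & SPEC =====
-- A raises ValueError whenever k runs empty mid-loop (max([])) or a block equals the maximum
-- of the cards still held (k.index(None)); whether the latter happens depends on the whole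
-- removal trace, so Pre_ excludes the closed-form superset of that crash set: block i may not
-- both occur in k and reach the (i+1)-th-largest card of k (the smallest value the remaining
-- maximum can have at step i).  On the few excluded inputs where A's trace happens to survive,
-- A and B agree anyway (see the cite); every input where A raises is excluded.
def Pre_warScore (n : List Int) (k : List Int) : Prop :=
  n.length ≤ k.length ∧
  ∀ i (_ : i < n.length),
    n[i] ∉ k ∨ n[i] < (PySem.List.sorted k (fun x => x) false).getD (k.length - 1 - i) 0
instance (n : List Int) (k : List Int) : Decidable (Pre_warScore n k) := by
  unfold Pre_warScore; infer_instance

def pvWitness_warScore : List Int × List Int := ([5, 1], [2, 6, 3])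

def Spec_warScore (n : List Int) (k : List Int) (out : Int) : Prop := out = warScore_alt n k
instance (n : List Int) (k : List Int) (out : Int) : Decidable (Spec_warScore n k out) := by
  unfold Spec_warScore; infer_instance

-- ===== CLAIM (what is proved, stated in full; the proofs are below) =====
def Claim_equal_warScore : Prop := ∀ (n : List Int) (k : List Int), Dom_warScore n k → Pre_warScore n k → Spec_warScore n k (warScore n k)

-- ===== LEMMAS AND PROOFS =====

lemma bsrFuel_spec (ks : List Int) (b : Int) (hsort : ks.Pairwise (· ≤ ·)) :
    ∀ (f lo hi : Nat), hi - lo ≤ f → lo ≤ hi → hi ≤ ks.length →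
    (∀ j (_ : j < ks.length), j < lo → ks[j] ≤ b) →
    (∀ j (_ : j < ks.length), hi ≤ j → b < ks[j]) →
    bsrFuel ks b f lo hi ≤ ks.length ∧
    (∀ j (_ : j < ks.length), j < bsrFuel ks b f lo hi → ks[j] ≤ b) ∧
    (∀ j (_ : j < ks.length), bsrFuel ks b f lo hi ≤ j → b < ks[j]) := by
  intro f
  induction f with
  | zero =>
    intro lo hi hf hlo hhi hbelow habove
    have hline : lo = hi := by omega
    simp only [bsrFuel]
    exact ⟨by omega, fun j hj hjlt => hbelow j hj hjlt,
           fun j hj hle => habove j hj (by omega)⟩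
  | succ f ih =>
    intro lo hi hf hlo hhi hbelow habove
    simp only [bsrFuel]
    by_cases h : lo < hi
    · rw [if_pos h]
      have hmidlt : (lo + hi) / 2 < ks.length := by omega
      by_cases hlt : b < ks.getD ((lo + hi) / 2) 0
      · rw [if_pos hlt]
        refine ih lo ((lo + hi) / 2) (by omega) (by omega) (by omega) hbelow ?_
        intro j hj hmid
        have h1 : ks[(lo + hi) / 2] ≤ ks[j] := by
          rcases Nat.eq_or_lt_of_le hmid with h'|h'
          · simp [h']
          · exact (List.pairwise_iff_getElem.mp hsort) _ _ hmidlt hj h'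
        calc b < ks.getD ((lo + hi) / 2) 0 := hlt
          _ = ks[(lo + hi) / 2] := by
              rw [List.getD_eq_getElem?_getD, List.getElem?_eq_getElem hmidlt]; rfl
          _ ≤ ks[j] := h1
      · rw [if_neg hlt]
        refine ih ((lo + hi) / 2 + 1) hi (by omega) (by omega) hhi ?_ habove
        intro j hj hjlt
        have hm : ks[(lo + hi) / 2] ≤ b := by
          have h2 := hlt
          rw [List.getD_eq_getElem?_getD, List.getElem?_eq_getElem hmidlt] at h2
          simpa using not_lt.mp h2
        rcases Nat.lt_or_ge j ((lo + hi) / 2) with h'|h'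
        · exact le_trans ((List.pairwise_iff_getElem.mp hsort) _ _ hj hmidlt h') hm
        · have hje : j = (lo + hi) / 2 := by omega
          subst hje; exact hm
    · rw [if_neg h]
      exact ⟨by omega, fun j hj hjlt => hbelow j hj hjlt,
             fun j hj hle => habove j hj (by omega)⟩

lemma bsr_spec (ks : List Int) (b : Int) (hsort : ks.Pairwise (· ≤ ·)) :
    ∀ (lo hi : Nat), lo ≤ hi → hi ≤ ks.length →
    (∀ j (_ : j < ks.length), j < lo → ks[j] ≤ b) →
    (∀ j (_ : j < ks.length), hi ≤ j → b < ks[j]) →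
    bsr ks b lo hi ≤ ks.length ∧
    (∀ j (_ : j < ks.length), j < bsr ks b lo hi → ks[j] ≤ b) ∧
    (∀ j (_ : j < ks.length), bsr ks b lo hi ≤ j → b < ks[j]) := by
  intro lo hi hlo hhi hbelow habove
  exact bsrFuel_spec ks b hsort (hi - lo) lo hi (le_refl _) hlo hhi hbelow habove

lemma minAbove_fold (a : Int) (l : List Int) : ∀ (acc : Option Int),
    (l.foldl (fun mn num =>
      match mn with
      | none => if a < num then some num else none
      | some m => if a < num ∧ num < m then some num else some m) acc = none →
        acc = none ∧ ∀ y ∈ l, y ≤ a) ∧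
    (∀ m, l.foldl (fun mn num =>
      match mn with
      | none => if a < num then some num else none
      | some m => if a < num ∧ num < m then some num else some m) acc = some m →
        ((m ∈ l ∧ a < m) ∨ acc = some m) ∧ (∀ y ∈ l, a < y → m ≤ y) ∧
        (∀ m0, acc = some m0 → m ≤ m0)) := by
  induction l with
  | nil =>
    intro acc
    refine ⟨fun h => ⟨by simpa using h, by simp⟩, fun m h => ?_⟩
    simp only [List.foldl_nil] at h
    exact ⟨Or.inr h, by simp, fun m0 h0 => by rw [h] at h0; exact le_of_eq (Option.some.inj h0)⟩
  | cons x t ih =>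
    intro acc
    simp only [List.foldl_cons]
    set acc' : Option Int := (match acc with
      | none => if a < x then some x else none
      | some m => if a < x ∧ x < m then some x else some m) with hacc'def
    refine ⟨fun h => ?_, fun m h => ?_⟩
    · obtain ⟨hacc', ht⟩ := (ih acc').1 h
      match acc with
      | none =>
        rw [hacc'def] at hacc'
        have hacc2 : (if a < x then some x else none) = none := hacc'
        by_cases hax : a < x
        · simp [hax] at hacc2
        · exact ⟨rfl, fun y hy => by
            rcases List.mem_cons.mp hy with h'|h'
            · subst h'; omega
            · exact ht y h'⟩
      | some m0 =>
        exfalso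
        rw [hacc'def] at hacc'
        have hacc2 : (if a < x ∧ x < m0 then some x else some m0) = none := hacc'
        by_cases hc : a < x ∧ x < m0 <;> simp [hc] at hacc2
    · obtain ⟨h1, h2, h3⟩ := (ih acc').2 m h
      refine ⟨?_, ?_, ?_⟩
      · rcases h1 with ⟨hm, ha⟩|he
        · exact Or.inl ⟨List.mem_cons_of_mem x hm, ha⟩
        · rw [hacc'def] at he
          match acc with
          | none =>
            have he' : (if a < x then some x else none) = some m := he
            by_cases hax : a < x
            · rw [if_pos hax] at he'
              obtain rfl := Option.some.inj he'
              exact Or.inl ⟨List.mem_cons_self, hax⟩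
            · rw [if_neg hax] at he'; cases he'
          | some m0 =>
            have he' : (if a < x ∧ x < m0 then some x else some m0) = some m := he
            by_cases hc : a < x ∧ x < m0
            · rw [if_pos hc] at he'
              obtain rfl := Option.some.inj he'
              exact Or.inl ⟨List.mem_cons_self, hc.1⟩
            · rw [if_neg hc] at he'
              exact Or.inr he'
      · intro y hy hay
        rcases List.mem_cons.mp hy with h'|h'
        · subst h'
          match acc with
          | none =>
            exact h3 y (by rw [hacc'def]; show (if a < y then some y else none) = some y; rw [if_pos hay])
          | some m0 =>
            by_cases hc : a < y ∧ y < m0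
            · exact h3 y (by rw [hacc'def]; show (if a < y ∧ y < m0 then some y else some m0) = some y; rw [if_pos hc])
            · have hm0y : m0 ≤ y := by omega
              have := h3 m0 (by rw [hacc'def]; show (if a < y ∧ y < m0 then some y else some m0) = some m0; rw [if_neg hc])
              omega
        · exact h2 y h' hay
      · intro m0 hacc
        subst hacc
        by_cases hc : a < x ∧ x < m0
        · have := h3 x (by rw [hacc'def]; show (if a < x ∧ x < m0 then some x else some m0) = some x; rw [if_pos hc]); omega
        · exact h3 m0 (by rw [hacc'def]; show (if a < x ∧ x < m0 then some x else some m0) = some m0; rw [if_neg hc])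

lemma minAbove_none (l : List Int) (a : Int) :
    minAbovePort l a = none → ∀ y ∈ l, y ≤ a := by
  intro h; exact ((minAbove_fold a l none).1 h).2

lemma minAbove_some (l : List Int) (a : Int) (m : Int) :
    minAbovePort l a = some m → m ∈ l ∧ a < m ∧ ∀ y ∈ l, a < y → m ≤ y := by
  intro h
  obtain ⟨h1, h2, _⟩ := (minAbove_fold a l none).2 m h
  rcases h1 with ⟨hm, ha⟩|hc
  · exact ⟨hm, ha, h2⟩
  · simp at hc

lemma eraseIdx_perm_erase (l : List Int) (i : Nat) (hi : i < l.length) :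
    (l.eraseIdx i).Perm (l.erase l[i]) :=
  List.Perm.symm (List.erase_getElem hi)

-- in a sorted list, any sublist dominates it position by position
lemma sublist_getElem_le : ∀ {s t : List Int}, List.Sublist s t → t.Pairwise (· ≤ ·) →
    ∀ j (hjs : j < s.length) (hjt : j < t.length), t[j] ≤ s[j] := by
  intro s t h
  induction h with
  | slnil => intro _ j hj _; simp at hj
  | @cons l₁ l₂ a h ih =>
    intro hp j hjs hjt2
    have hp' := (List.pairwise_cons.mp hp).2
    have hjt : j < l₂.length := lt_of_lt_of_le hjs h.length_le
    have h1 : (a :: l₂)[j]'(hjt2) ≤ l₂[j] := by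
      cases j with
      | zero => simpa using (List.pairwise_cons.mp hp).1 _ (List.getElem_mem hjt)
      | succ m =>
        have hmm : m + 1 < (a :: l₂).length := by simp; omega
        have := List.pairwise_iff_getElem.mp hp (m + 1) (m + 2)
          (by simp; omega) (by simp; omega) (by omega)
        simpa using this
    exact le_trans h1 (ih hp' j hjs hjt)
  | @cons₂ l₁ l₂ a h ih =>
    intro hp j hjs hjt
    cases j with
    | zero => simp
    | succ m =>
      have hp' := (List.pairwise_cons.mp hp).2
      have h1 := ih hp' m (by simp at hjs; omega) (by simp at hjt; omega)
      simpa using h1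

lemma step_eq (b : Int) (s : Int) (ka kb : List Int)
    (hperm : kb.Perm ka) (hsort : kb.Pairwise (· ≤ ·)) (hne : ka ≠ [])
    (hb : b ∉ ka ∨ ∃ x ∈ ka, b < x) :
    ∃ s' ka' kb', warScoreStepA (s, ka) b = (s', ka') ∧ warScoreStepB (s, kb) b = (s', kb') ∧
      kb'.Perm ka' ∧ List.Sublist kb' kb ∧ ka'.length + 1 = ka.length := by
  have hkbne : kb ≠ [] := fun h => hne (List.Perm.eq_nil ((h ▸ hperm).symm))
  have hmono := List.pairwise_iff_getElem.mp hsort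
  obtain ⟨mx, hmx⟩ : ∃ mx, PySem.List.max? ka (fun x => x) = some mx := by
    cases h : PySem.List.max? ka (fun x => x) with
    | none => exact absurd ((PySem.List.max?_eq_none_iff ka _).mp h) hne
    | some mx => exact ⟨mx, rfl⟩
  have hmxmem : mx ∈ ka := PySem.List.max?_mem hmx
  have hmxmax : ∀ y ∈ ka, y ≤ mx := PySem.List.max?_isMax hmx
  have hbmx : b ≠ mx := by
    rcases hb with hb|⟨x, hx, hbx⟩
    · exact fun h => hb (h ▸ hmxmem)
    · have := hmxmax x hx; omega
  obtain ⟨hlo_le, hbelow, habove⟩ := bsr_spec kb b hsort 0 kb.length (by omega) (le_refl _)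
    (by intro j hj hj0; omega) (by intro j hj hj0; omega)
  set lo := bsr kb b 0 kb.length with hlodef
  by_cases hlt : mx < b
  · -- win branch
    have hloeq : lo = kb.length := by
      by_contra hne'
      have hlolt : lo < kb.length := lt_of_le_of_ne hlo_le hne'
      have h1 : b < kb[lo] := habove lo hlolt (le_refl _)
      have h2 : kb[lo] ∈ ka := hperm.subset (List.getElem_mem hlolt)
      have := hmxmax _ h2
      omega
    obtain ⟨mn, hmn⟩ : ∃ mn, PySem.List.min? ka (fun x => x) = some mn := by
      cases h : PySem.List.min? ka (fun x => x) with
      | none => exact absurd ((PySem.List.min?_eq_none_iff ka _).mp h) hne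
      | some mn => exact ⟨mn, rfl⟩
    have hmnmem : mn ∈ ka := PySem.List.min?_mem hmn
    have hmnmin : ∀ y ∈ ka, mn ≤ y := PySem.List.min?_isMin hmn
    obtain ⟨i, hi⟩ : ∃ i, PySem.List.index? ka mn = some i := by
      cases h : PySem.List.index? ka mn with
      | none => exact absurd ((PySem.List.index?_eq_none_iff ka mn).mp h) (by simp [hmnmem])
      | some i => exact ⟨i, rfl⟩
    obtain ⟨hilt, hkai, _⟩ := PySem.List.getElem_of_index?_eq_some hi
    have hkb0lt : 0 < kb.length := List.length_pos_iff.mpr hkbne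
    have hkb0 : kb[0] = mn := by
      have h1 : mn ≤ kb[0] := hmnmin _ (hperm.subset (List.getElem_mem hkb0lt))
      obtain ⟨j, hj, hje⟩ := List.mem_iff_getElem.mp (hperm.mem_iff.mpr hmnmem)
      have h2 : kb[0] ≤ mn := by
        rcases Nat.eq_zero_or_pos j with hj0|hj0
        · subst hj0; omega
        · have := hmono 0 j hkb0lt hj hj0; omega
      omega
    refine ⟨s + 1, ka.eraseIdx i, kb.eraseIdx 0, ?_, ?_, ?_, ?_, ?_⟩
    · simp only [warScoreStepA, hmx, if_pos hlt, hmn, hi]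
    · simp only [warScoreStepB, ← hlodef, if_pos hloeq]
    · have p1 := eraseIdx_perm_erase kb 0 hkb0lt
      rw [hkb0] at p1
      have p3 := eraseIdx_perm_erase ka i hilt
      rw [hkai] at p3
      exact (p1.trans (hperm.erase mn)).trans p3.symm
    · exact List.eraseIdx_sublist kb 0
    · rw [List.length_eraseIdx_of_lt hilt]; omega
  · -- opponent-beats branch
    have hlolt : lo < kb.length := by
      rcases lt_or_eq_of_le hlo_le with h|h
      · exact h
      · exfalso
        obtain ⟨j, hj, hje⟩ := List.mem_iff_getElem.mp (hperm.mem_iff.mpr hmxmem)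
        have := hbelow j hj (by omega)
        omega
    have hblt : b < kb[lo] := habove lo hlolt (le_refl _)
    obtain ⟨m, hm⟩ : ∃ m, minAbovePort ka b = some m := by
      cases h : minAbovePort ka b with
      | none =>
        exact absurd (minAbove_none ka b h _ (hperm.subset (List.getElem_mem hlolt))) (by simpa using hblt)
      | some m => exact ⟨m, rfl⟩
    obtain ⟨hmmem, hbm, hmmin⟩ := minAbove_some ka b m hm
    obtain ⟨i, hi⟩ : ∃ i, PySem.List.index? ka m = some i := by
      cases h : PySem.List.index? ka m with
      | none => exact absurd ((PySem.List.index?_eq_none_iff ka m).mp h) (by simp [hmmem])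
      | some i => exact ⟨i, rfl⟩
    obtain ⟨hilt, hkai, _⟩ := PySem.List.getElem_of_index?_eq_some hi
    have hkblo : kb[lo] = m := by
      have h1 : m ≤ kb[lo] := hmmin _ (hperm.subset (List.getElem_mem hlolt)) hblt
      obtain ⟨j, hj, hje⟩ := List.mem_iff_getElem.mp (hperm.mem_iff.mpr hmmem)
      have hjlo : lo ≤ j := by
        by_contra hjlo
        have := hbelow j hj (by omega)
        omega
      have h2 : kb[lo] ≤ m := by
        rcases Nat.eq_or_lt_of_le hjlo with h'|h'
        · subst hje; simp [h']
        · have := hmono lo j hlolt hj h'; omega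
      omega
    refine ⟨s, ka.eraseIdx i, kb.eraseIdx lo, ?_, ?_, ?_, ?_, ?_⟩
    · simp only [warScoreStepA, hmx, if_neg hlt, hm, hi]
    · simp only [warScoreStepB, ← hlodef, if_neg (by omega : ¬ lo = kb.length)]
    · have p1 := eraseIdx_perm_erase kb lo hlolt
      rw [hkblo] at p1
      have p3 := eraseIdx_perm_erase ka i hilt
      rw [hkai] at p3
      exact (p1.trans (hperm.erase m)).trans p3.symm
    · exact List.eraseIdx_sublist kb lo
    · rw [List.length_eraseIdx_of_lt hilt]; omega

lemma fold_eq (k0 ks0 : List Int) (hks0 : ks0.Pairwise (· ≤ ·)) (hperm0 : ks0.Perm k0) :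
    ∀ (n : List Int) (s : Int) (ka kb : List Int),
    kb.Perm ka → List.Sublist kb ks0 → n.length ≤ ka.length →
    (∀ i (_ : i < n.length), n[i] ∉ k0 ∨ n[i] < ks0.getD (ka.length - 1 - i) 0) →
    (n.foldl warScoreStepA (s, ka)).1 = (n.foldl warScoreStepB (s, kb)).1 := by
  intro n
  induction n with
  | nil => intro s ka kb _ _ _ _; rfl
  | cons b t ih =>
    intro s ka kb hperm hsub hlen H
    have hlenkb : kb.length = ka.length := hperm.length_eq
    have hsort : kb.Pairwise (· ≤ ·) := List.Pairwise.sublist hsub hks0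
    have hne : ka ≠ [] := by
      intro h; subst h; simp at hlen
    have hkapos : 0 < ka.length := List.length_pos_iff.mpr hne
    have hb : b ∉ ka ∨ ∃ x ∈ ka, b < x := by
      rcases H 0 (by simp) with h|h
      · left
        intro hmem
        exact (by simpa using h : b ∉ k0)
          (hperm0.subset (hsub.subset (hperm.mem_iff.mpr hmem)))
      · right
        have hjkb : ka.length - 1 < kb.length := by omega
        have hjks0 : ka.length - 1 < ks0.length := lt_of_lt_of_le hjkb hsub.length_le
        refine ⟨kb[ka.length - 1], hperm.subset (List.getElem_mem hjkb), ?_⟩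
        have h1 : ks0[ka.length - 1] ≤ kb[ka.length - 1] :=
          sublist_getElem_le hsub hks0 (ka.length - 1) hjkb hjks0
        have h2 : ks0.getD (ka.length - 1 - 0) 0 = ks0[ka.length - 1] := by
          rw [List.getD_eq_getElem?_getD, Nat.sub_zero, List.getElem?_eq_getElem hjks0]; rfl
        simp only [List.getElem_cons_zero] at h
        omega
    obtain ⟨s', ka', kb', hA, hB, hperm', hsub', hlen'⟩ :=
      step_eq b s ka kb hperm hsort hne hb
    simp only [List.foldl_cons, hA, hB]
    refine ih s' ka' kb' hperm' (hsub'.trans hsub)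
      (by simp only [List.length_cons] at hlen; omega) ?_
    intro i hi
    have := H (i + 1) (by simp; omega)
    simpa [Nat.sub_sub, show ka.length - 1 - (i + 1) = ka'.length - 1 - i by omega] using this

-- ===== VERDICT (by name: the statement is the Claim_ definition above) =====
theorem warScore_spec : Claim_equal_warScore := by
  intro n k _ hpre
  unfold Spec_warScore warScore warScore_alt
  exact fold_eq k (PySem.List.sorted k (fun x => x) false)
    (PySem.List.sorted_pairwise k (fun x => x))
    (PySem.List.sorted_perm k (fun x => x) false)
    n 0 k (PySem.List.sorted k (fun x => x) false)
    (PySem.List.sorted_perm k (fun x => x) false)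
    (List.Sublist.refl _)
    hpre.1 hpre.2
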